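-- pv_equiv track=rewrite | github.com/cianfrocco-lab/COSMIC-CryoEM-Gateway | remote_scripts/expanse_relion_submit.py | returnEntryNumber
-- ===== SOURCE A (Python) =====
-- def returnEntryNumber(inputlist,queryString):
--         '''Returns entry number in list for a given string in a list'''
--         counter=1
--         output=0
--         for entry in inputlist.split():
--                 if entry == queryString:
--                         output=counter
--                 counter=counter+1
--         return output
-- ===== SOURCE B (Python) =====
-- def returnEntryNumber(inputlist, queryString):
--         '''Returns entry number in list for a given string in a list'''
--         words = inputlist.split()
--         for i in range(len(words) - 1, -1, -1):
--                 if words[i] == queryString: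
--                         return i + 1
--         return 0
-- ===== Notes on version B (the rewrite author's own statement) =====
-- stated objective: alternative
-- what changed: Replaces A's full forward scan that keeps overwriting a running counter/output pair with a backward index scan that early-exits at the last occurrence, maintaining no state beyond the index.
import Mathlib
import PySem

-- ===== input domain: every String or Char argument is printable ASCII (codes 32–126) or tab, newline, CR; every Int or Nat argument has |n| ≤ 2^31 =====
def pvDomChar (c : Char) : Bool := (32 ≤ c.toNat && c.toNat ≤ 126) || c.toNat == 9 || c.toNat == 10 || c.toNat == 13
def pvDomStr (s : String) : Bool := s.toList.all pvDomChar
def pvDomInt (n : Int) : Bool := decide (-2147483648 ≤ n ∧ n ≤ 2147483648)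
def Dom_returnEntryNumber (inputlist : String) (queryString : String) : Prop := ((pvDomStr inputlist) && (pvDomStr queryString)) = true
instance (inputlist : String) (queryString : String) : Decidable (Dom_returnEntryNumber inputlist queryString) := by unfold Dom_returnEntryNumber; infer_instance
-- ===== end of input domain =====

-- B replaces A's forward scan (counter/output pair overwritten at each match) with a
-- backward index scan that returns at the first (i.e. last) occurrence; alternative, same cost.

-- ===== PORT A =====
-- forward loop over the words, carrying (counter, output); returns output
def returnEntryNumber (inputlist : String) (queryString : String) : Int :=
  ((PySem.Str.split₀ inputlist).foldl
    (fun (st : Int × Int) entry =>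
      (st.1 + 1, if entry == queryString then st.1 else st.2))
    (1, 0)).2

-- ===== PORT B =====
-- scan indices len-1, len-2, …, 0; return i+1 at the first word equal to queryString, else 0
def pvAltLoop (words : List String) (q : String) : Nat → Int
  | 0 => 0
  | n + 1 => if words[n]? = some q then (n : Int) + 1 else pvAltLoop words q n

def returnEntryNumber_alt (inputlist : String) (queryString : String) : Int :=
  let words := PySem.Str.split₀ inputlist
  pvAltLoop words queryString words.length

-- ===== PRECONDITION & SPEC =====
def Spec_returnEntryNumber (inputlist : String) (queryString : String) (out : Int) : Prop := out = returnEntryNumber_alt inputlist queryString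
instance (inputlist : String) (queryString : String) (out : Int) : Decidable (Spec_returnEntryNumber inputlist queryString out) := by unfold Spec_returnEntryNumber; infer_instance

-- ===== CLAIM (what is proved, stated in full; the proofs are below) =====
def Claim_equal_returnEntryNumber : Prop := ∀ (inputlist : String) (queryString : String), Dom_returnEntryNumber inputlist queryString → Spec_returnEntryNumber inputlist queryString (returnEntryNumber inputlist queryString)

-- ===== LEMMAS AND PROOFS =====

theorem pvAltLoop_append (ws : List String) (w q : String) (n : Nat) (h : n ≤ ws.length) :
    pvAltLoop (ws ++ [w]) q n = pvAltLoop ws q n := by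
  induction n with
  | zero => rfl
  | succ m ih =>
    simp only [pvAltLoop, List.getElem?_append_left (by omega : m < ws.length),
      ih (by omega)]

theorem pvFoldl_counter (ws : List String) (q : String) (c o : Int) :
    ((ws.foldl (fun (st : Int × Int) entry =>
      (st.1 + 1, if entry == q then st.1 else st.2)) (c, o)).1) = c + ws.length := by
  induction ws generalizing c o with
  | nil => simp
  | cons w ws ih =>
    rw [List.foldl_cons, ih]
    simp only [List.length_cons]
    push_cast
    ring

theorem pvMain (ws : List String) (q : String) :
    ((ws.foldl (fun (st : Int × Int) entry =>
      (st.1 + 1, if entry == q then st.1 else st.2)) (1, 0)).2)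
      = pvAltLoop ws q ws.length := by
  induction ws using List.reverseRecOn with
  | nil => rfl
  | append_singleton ws w ih =>
    rw [List.foldl_append]
    have hc := pvFoldl_counter ws q 1 0
    set st := ws.foldl (fun (st : Int × Int) entry =>
      (st.1 + 1, if entry == q then st.1 else st.2)) (1, 0) with hst
    have hlen : (ws ++ [w]).length = ws.length + 1 := by simp
    rw [hlen]
    simp only [pvAltLoop, List.getElem?_append_right (le_refl ws.length),
      Nat.sub_self, List.getElem?_cons_zero, List.foldl_cons, List.foldl_nil]
    by_cases hw : w = q
    · simp [hw, hc]; ring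
    · have : (w == q) = false := by simp [hw]
      simp [this, Option.some_inj, hw, pvAltLoop_append ws w q ws.length (le_refl _), ih]

-- ===== VERDICT (by name: the statement is the Claim_ definition above) =====
theorem returnEntryNumber_spec : Claim_equal_returnEntryNumber := by
  intro inputlist queryString _
  unfold Spec_returnEntryNumber returnEntryNumber returnEntryNumber_alt
  exact pvMain (PySem.Str.split₀ inputlist) queryString
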